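-- pv_equiv track=rewrite | github.com/mirkosaenz/Teoria-De-Algoritmos | Guia/03. Backtracking/guia/backtracking/10.py | _tiradas_suman
-- ===== SOURCE A (Python) =====
-- def _tiradas_suman(n, s, sol_parcial, suma_parcial, soluciones):
--     if suma_parcial > s:
--         return soluciones
--
--     if len(sol_parcial) == n:
--         if suma_parcial == s:
--             soluciones.append(sol_parcial.copy())
--         return soluciones
--
--     soluciones_max = soluciones
--
--     for i in range(1, 7):
--         sol_parcial.append(i)
--         soluciones_max = _tiradas_suman(n, s, sol_parcial, suma_parcial+i, soluciones_max)
--         sol_parcial.pop()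
--
--     return soluciones_max
-- ===== SOURCE B (Python) =====
-- def _completions(rem, target):
--     # all lists of `rem` dice values (1..6) summing to `target`, in lexicographic order,
--     # with feasibility pruning: target must lie in [rem, 6*rem]
--     if rem == 0:
--         return [[]] if target == 0 else []
--     if target < rem or target > 6 * rem:
--         return []
--     out = []
--     for i in range(1, 7):
--         for tail in _completions(rem - 1, target - i):
--             out.append([i] + tail)
--     return out
--
--
-- def _tiradas_suman(n, s, sol_parcial, suma_parcial, soluciones):
--     rem = n - len(sol_parcial)
--     if rem < 0:
--         return soluciones
--     for c in _completions(rem, s - suma_parcial):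
--         soluciones.append(sol_parcial + c)
--     return soluciones
-- ===== Notes on version B (the rewrite author's own statement) =====
-- stated objective: alternative
-- what changed: Replaces A's blind 6-way backtracking accumulator (which explores every die prefix until the running sum exceeds s) by a pure enumerator of completions with min/max-reachable feasibility pruning (a node is expanded only when rem <= target <= 6*rem), whose output is appended to soluciones in one pass.
-- outside the precondition, e.g. on _tiradas_suman(950, 945, [], 0, []): A does not finish within the time limit, B returns []
import Mathlib
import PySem

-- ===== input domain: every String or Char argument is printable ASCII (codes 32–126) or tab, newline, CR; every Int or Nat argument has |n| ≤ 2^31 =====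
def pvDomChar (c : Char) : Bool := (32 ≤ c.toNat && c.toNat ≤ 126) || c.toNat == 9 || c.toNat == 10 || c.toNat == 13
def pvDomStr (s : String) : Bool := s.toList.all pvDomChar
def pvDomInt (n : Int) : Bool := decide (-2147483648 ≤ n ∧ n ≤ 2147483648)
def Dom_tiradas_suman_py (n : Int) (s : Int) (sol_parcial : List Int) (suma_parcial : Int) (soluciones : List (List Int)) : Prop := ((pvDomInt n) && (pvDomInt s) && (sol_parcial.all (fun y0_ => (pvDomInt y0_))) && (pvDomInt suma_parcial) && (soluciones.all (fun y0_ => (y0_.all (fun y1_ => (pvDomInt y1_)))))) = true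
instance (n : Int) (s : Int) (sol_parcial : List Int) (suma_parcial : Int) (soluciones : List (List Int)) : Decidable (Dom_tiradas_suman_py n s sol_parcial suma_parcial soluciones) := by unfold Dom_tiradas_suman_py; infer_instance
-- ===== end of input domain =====

-- B replaces A's blind 6-way backtracking with a pruned pure enumerator of completions
-- (only subtrees with target inside [rem, 6*rem] are expanded), appended to `soluciones`
-- in one pass; both A and B append the same lists in place to `soluciones`, so side
-- effects coincide too.

-- ===== PORT A =====
-- termination measure lemma for the port of A (cited by its decreasing_by)
lemma pv_decA (s suma i : Int) (h : ¬ suma > s) (hi : 1 ≤ i) :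
    (s - (suma + i) + 1).toNat < (s - suma + 1).toNat := by omega

-- The Python for-loop runs over the constant range(1,7); it is transliterated unrolled,
-- threading `soluciones_max` exactly as the Python does (append i / recurse / pop
-- becomes passing `sol_parcial ++ [i]`).
def tiradas_suman_py (n : Int) (s : Int) (sol_parcial : List Int) (suma_parcial : Int) (soluciones : List (List Int)) : List (List Int) :=
  if suma_parcial > s then soluciones
  else if (sol_parcial.length : Int) = n then
    (if suma_parcial = s then soluciones ++ [sol_parcial] else soluciones)
  else
    let s1 := tiradas_suman_py n s (sol_parcial ++ [1]) (suma_parcial + 1) soluciones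
    let s2 := tiradas_suman_py n s (sol_parcial ++ [2]) (suma_parcial + 2) s1
    let s3 := tiradas_suman_py n s (sol_parcial ++ [3]) (suma_parcial + 3) s2
    let s4 := tiradas_suman_py n s (sol_parcial ++ [4]) (suma_parcial + 4) s3
    let s5 := tiradas_suman_py n s (sol_parcial ++ [5]) (suma_parcial + 5) s4
    let s6 := tiradas_suman_py n s (sol_parcial ++ [6]) (suma_parcial + 6) s5
    s6
termination_by (s - suma_parcial + 1).toNat
decreasing_by all_goals exact pv_decA s suma_parcial _ ‹¬ suma_parcial > s› (by decide)

-- ===== PORT B =====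
-- termination measure lemma for the port of B (cited by its decreasing_by)
lemma pv_decC (rem target : Int) (h0 : ¬ rem = 0)
    (h1 : ¬ (target < rem ∨ target > 6 * rem)) : (rem - 1).toNat < rem.toNat := by
  rw [not_or] at h1; omega

-- All lists of `rem` dice (1..6) summing to `target`, lexicographic, with feasibility
-- pruning; the Python nested for-loops over the constant range(1,7) are transliterated
-- unrolled (inner loop = map, appends = ++).
def pvCompletions (rem : Int) (target : Int) : List (List Int) :=
  if rem = 0 then (if target = 0 then [[]] else [])
  else if target < rem ∨ target > 6 * rem then []
  else
    (pvCompletions (rem - 1) (target - 1)).map (fun t => 1 :: t) ++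
    (pvCompletions (rem - 1) (target - 2)).map (fun t => 2 :: t) ++
    (pvCompletions (rem - 1) (target - 3)).map (fun t => 3 :: t) ++
    (pvCompletions (rem - 1) (target - 4)).map (fun t => 4 :: t) ++
    (pvCompletions (rem - 1) (target - 5)).map (fun t => 5 :: t) ++
    (pvCompletions (rem - 1) (target - 6)).map (fun t => 6 :: t)
termination_by rem.toNat
decreasing_by all_goals exact pv_decC rem target ‹¬ rem = 0› ‹¬ (target < rem ∨ target > 6 * rem)›

def tiradas_suman_py_alt (n : Int) (s : Int) (sol_parcial : List Int) (suma_parcial : Int) (soluciones : List (List Int)) : List (List Int) :=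
  let rem := n - (sol_parcial.length : Int)
  if rem < 0 then soluciones
  else soluciones ++ (pvCompletions rem (s - suma_parcial)).map (fun c => sol_parcial ++ c)

-- ===== PRECONDITION & SPEC =====
-- Pre_ excludes exactly the inputs on which Python A never returns a value: when the recursion
-- depth min(n - len(sol_parcial), s - suma_parcial + 1) (or s - suma_parcial + 1 once
-- len(sol_parcial) exceeds n) is over 900, A's leftmost all-ones path overflows CPython's
-- ~1000-frame stack limit and raises RecursionError, or — marginally under that limit — A must
-- make at least 2^900 recursive calls before returning, which it never completes; on every
-- excluded input A raises or diverges, never producing a value B could match.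
def Pre_tiradas_suman_py (n : Int) (s : Int) (sol_parcial : List Int) (suma_parcial : Int) (soluciones : List (List Int)) : Prop :=
  (if (0:Int) ≤ n - (sol_parcial.length : Int)
     then min (n - (sol_parcial.length : Int)) (max (s - suma_parcial + 1) 0)
     else max (s - suma_parcial + 1) 0) ≤ 900
instance (n : Int) (s : Int) (sol_parcial : List Int) (suma_parcial : Int) (soluciones : List (List Int)) : Decidable (Pre_tiradas_suman_py n s sol_parcial suma_parcial soluciones) := by unfold Pre_tiradas_suman_py; infer_instance
def pvWitness_tiradas_suman_py : Int × Int × List Int × Int × List (List Int) := (3, 7, [], 0, [])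
def Spec_tiradas_suman_py (n : Int) (s : Int) (sol_parcial : List Int) (suma_parcial : Int) (soluciones : List (List Int)) (out : List (List Int)) : Prop := out = tiradas_suman_py_alt n s sol_parcial suma_parcial soluciones
instance (n : Int) (s : Int) (sol_parcial : List Int) (suma_parcial : Int) (soluciones : List (List Int)) (out : List (List Int)) : Decidable (Spec_tiradas_suman_py n s sol_parcial suma_parcial soluciones out) := by unfold Spec_tiradas_suman_py; infer_instance

-- ===== CLAIM (what is proved, stated in full; the proofs are below) =====
def Claim_equal_tiradas_suman_py : Prop := ∀ (n : Int) (s : Int) (sol_parcial : List Int) (suma_parcial : Int) (soluciones : List (List Int)), Dom_tiradas_suman_py n s sol_parcial suma_parcial soluciones → Pre_tiradas_suman_py n s sol_parcial suma_parcial soluciones → Spec_tiradas_suman_py n s sol_parcial suma_parcial soluciones (tiradas_suman_py n s sol_parcial suma_parcial soluciones)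

-- ===== LEMMAS AND PROOFS =====

-- the pruning guard is exact: nothing to enumerate outside [rem, 6*rem]
lemma pvCompletions_empty_of (rem target : Int) (_h0 : 0 ≤ rem)
    (h : target < rem ∨ target > 6 * rem) : pvCompletions rem target = [] := by
  rw [pvCompletions]
  split_ifs <;> first | rfl | omega

-- for positive rem the feasibility guard of the one-step unfolding is redundant
lemma pvCompletions_unfold (rem target : Int) (h : 0 < rem) :
    pvCompletions rem target =
      (pvCompletions (rem - 1) (target - 1)).map (fun t => 1 :: t) ++
      (pvCompletions (rem - 1) (target - 2)).map (fun t => 2 :: t) ++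
      (pvCompletions (rem - 1) (target - 3)).map (fun t => 3 :: t) ++
      (pvCompletions (rem - 1) (target - 4)).map (fun t => 4 :: t) ++
      (pvCompletions (rem - 1) (target - 5)).map (fun t => 5 :: t) ++
      (pvCompletions (rem - 1) (target - 6)).map (fun t => 6 :: t) := by
  rw [pvCompletions, if_neg (by omega : ¬ rem = 0)]
  by_cases hg : target < rem ∨ target > 6 * rem
  · rw [if_pos hg]
    have e : ∀ i : Int, 1 ≤ i → i ≤ 6 → pvCompletions (rem - 1) (target - i) = [] := fun i hi1 hi6 =>
      pvCompletions_empty_of _ _ (by omega) (by omega)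
    rw [e 1 (by norm_num) (by norm_num), e 2 (by norm_num) (by norm_num),
        e 3 (by norm_num) (by norm_num), e 4 (by norm_num) (by norm_num),
        e 5 (by norm_num) (by norm_num), e 6 (by norm_num) (by norm_num)]
    simp
  · rw [if_neg hg]


-- characterisation of A's backtracking by B's pruned enumerator, by functional induction on A
lemma tiradas_suman_py_char (n : Int) (s : Int) (sol_parcial : List Int)
    (suma_parcial : Int) (soluciones : List (List Int)) :
    tiradas_suman_py n s sol_parcial suma_parcial soluciones =
      soluciones ++
        (if n - (sol_parcial.length : Int) < 0 then []
         else (pvCompletions (n - (sol_parcial.length : Int)) (s - suma_parcial)).map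
                (fun c => sol_parcial ++ c)) := by
  fun_induction tiradas_suman_py n s sol_parcial suma_parcial soluciones with
  | case1 sol suma sols h =>
    by_cases hneg : n - (sol.length : Int) < 0
    · simp [hneg]
    · rw [if_neg hneg, pvCompletions_empty_of _ _ (by omega) (by omega), List.map_nil,
          List.append_nil]
  | case2 sol sols h2 h1 =>
    rw [if_neg (by omega), show n - (sol.length : Int) = 0 by omega]
    simp [pvCompletions]
  | case3 sol suma sols h1 h2 h3 =>
    rw [if_neg (by omega), show n - (sol.length : Int) = 0 by omega]
    simp [pvCompletions, show ¬ s - suma = 0 by omega]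
  | case4 sol suma sols h1 h2 l1 l2 l3 l4 l5 l6 e1 f2 e2 f3 e3 f4 e4 f5 e5 f6 =>
    simp only [l5, l4, l3, l2, l1] at f6
    simp only [l6, l5, l4, l3, l2, l1]
    rw [f6, e5, e4, e3, e2, e1]
    simp only [List.length_append, List.length_cons, List.length_nil, Nat.cast_add,
      Nat.cast_one, zero_add,
      show ∀ i : Int, s - (suma + i) = s - suma - i from fun i => by ring,
      show (n : Int) - ((sol.length : Int) + 1) = n - (sol.length : Int) - 1 from by ring]
    by_cases hneg : n - (sol.length : Int) < 0
    · have h6 : n - (sol.length : Int) - 1 < 0 := by omega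
      simp [hneg, h6]
    · rw [if_neg hneg, if_neg (by omega : ¬ n - (sol.length : Int) - 1 < 0),
          if_neg (by omega : ¬ n - (sol.length : Int) - 1 < 0),
          if_neg (by omega : ¬ n - (sol.length : Int) - 1 < 0),
          if_neg (by omega : ¬ n - (sol.length : Int) - 1 < 0),
          if_neg (by omega : ¬ n - (sol.length : Int) - 1 < 0),
          if_neg (by omega : ¬ n - (sol.length : Int) - 1 < 0),
          pvCompletions_unfold (n - (sol.length : Int)) (s - suma) (by omega)]
      simp [List.map_append, List.map_map, Function.comp_def, List.append_assoc]

-- ===== VERDICT (by name: the statement is the Claim_ definition above) =====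
theorem tiradas_suman_py_spec : Claim_equal_tiradas_suman_py := by
  intro n s sol suma sols _ _
  unfold Spec_tiradas_suman_py tiradas_suman_py_alt
  rw [tiradas_suman_py_char]
  by_cases h : n - (sol.length : Int) < 0 <;> simp [h]
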